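-- pv_equiv track=rewrite | github.com/LUKIS123/NiDUC2-ARQ | DataGenerator.py | generate_stop_msg
-- ===== SOURCE A (Python) =====
-- def generate_stop_msg(length):
--     data_list = []
--     current = 1
--     for i in range(length):
--         data_list.append(current)
--         if current == 1:
--             current = 0
--         else:
--             current = 1
--     return data_list
-- ===== SOURCE B (Python) =====
-- def generate_stop_msg(length):
--     if length <= 0:
--         return []
--     pairs, rem = divmod(length, 2)
--     return [1, 0] * pairs + [1] * rem
-- ===== Notes on version B (the rewrite author's own statement) =====
-- stated objective: faster
-- what changed: Builds the list by block replication ([1,0] repeated length//2 times plus a trailing [1] when length is odd) instead of A's element-by-element loop that appends and flips a 'current' toggle.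
import Mathlib
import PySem

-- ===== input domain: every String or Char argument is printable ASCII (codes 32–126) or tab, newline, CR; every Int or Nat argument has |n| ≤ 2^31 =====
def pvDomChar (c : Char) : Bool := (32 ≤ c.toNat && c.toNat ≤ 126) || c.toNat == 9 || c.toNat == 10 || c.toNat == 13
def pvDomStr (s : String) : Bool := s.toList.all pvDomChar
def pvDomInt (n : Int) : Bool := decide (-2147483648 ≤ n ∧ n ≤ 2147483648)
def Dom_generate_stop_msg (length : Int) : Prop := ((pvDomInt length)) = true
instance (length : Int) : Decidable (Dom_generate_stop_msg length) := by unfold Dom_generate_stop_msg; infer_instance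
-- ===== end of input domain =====

-- B builds the result by block replication ([1,0] * (length//2) ++ [1] * (length%2)) instead of A's per-element toggle loop (objective: alternative).

-- ===== PORT A =====
def generate_stop_msg (length : Int) : List Int :=
  ((PySem.List.pyRange 0 length 1).foldl
    (fun (st : List Int × Int) _ =>
      (st.1 ++ [st.2], if st.2 = 1 then 0 else 1))
    ([], 1)).1

-- ===== PORT B =====
-- ports Python 'xs * n' for n ≥ 0
def pyRepeatList (xs : List Int) (n : Nat) : List Int := (List.replicate n xs).flatten

def generate_stop_msg_alt (length : Int) : List Int :=
  if length ≤ 0 then []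
  else
    pyRepeatList [1, 0] (PySem.Int.floordiv length 2).toNat
      ++ pyRepeatList [1] (PySem.Int.mod length 2).toNat

-- ===== PRECONDITION & SPEC =====
def Spec_generate_stop_msg (length : Int) (out : List Int) : Prop := out = generate_stop_msg_alt length
instance (length : Int) (out : List Int) : Decidable (Spec_generate_stop_msg length out) := by unfold Spec_generate_stop_msg; infer_instance

-- ===== CLAIM (what is proved, stated in full; the proofs are below) =====
def Claim_equal_generate_stop_msg : Prop := ∀ (length : Int), Dom_generate_stop_msg length → Spec_generate_stop_msg length (generate_stop_msg length)

-- ===== LEMMAS AND PROOFS =====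

-- the alternating sequence A produces, as a reference
def altseq : Int → Nat → List Int
  | _, 0 => []
  | c, n+1 => c :: altseq (1 - c) n

lemma foldl_altseq (l : List Int) (acc : List Int) (c : Int) (hc : c = 0 ∨ c = 1) :
    ((l.foldl (fun (st : List Int × Int) _ =>
      (st.1 ++ [st.2], if st.2 = 1 then 0 else 1)) (acc, c)).1)
      = acc ++ altseq c l.length := by
  induction l generalizing acc c with
  | nil => simp [altseq]
  | cons x xs ih =>
    simp only [List.foldl_cons, List.length_cons, altseq]
    rcases hc with h | h <;> subst h
    · rw [show ((if (0:Int) = 1 then (0:Int) else 1)) = 1 by norm_num,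
        ih (acc ++ [0]) 1 (Or.inr rfl)]
      simp
    · rw [show ((if (1:Int) = 1 then (0:Int) else 1)) = 0 by norm_num,
        ih (acc ++ [1]) 0 (Or.inl rfl)]
      simp

lemma altseq_even (k : Nat) :
    altseq 1 (2 * k) = (List.replicate k ([1, 0] : List Int)).flatten := by
  induction k with
  | zero => simp [altseq]
  | succ k ih =>
    have : 2 * (k + 1) = (2 * k) + 1 + 1 := by omega
    rw [this]
    simp only [altseq]
    norm_num
    rw [ih]
    simp [List.replicate_succ]

lemma altseq_odd (k : Nat) :
    altseq 1 (2 * k + 1) = (List.replicate k ([1, 0] : List Int)).flatten ++ [1] := by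
  induction k with
  | zero => simp [altseq]
  | succ k ih =>
    have h2 : 2 * (k + 1) + 1 = (2 * k + 1) + 1 + 1 := by omega
    rw [h2, show altseq 1 ((2 * k + 1) + 1 + 1) = 1 :: 0 :: altseq 1 (2 * k + 1) by
      simp [altseq], ih]
    simp [List.replicate_succ]

-- ===== VERDICT (by name: the statement is the Claim_ definition above) =====
theorem generate_stop_msg_spec : Claim_equal_generate_stop_msg := by
  intro length _
  unfold Spec_generate_stop_msg generate_stop_msg generate_stop_msg_alt
  rw [foldl_altseq _ _ _ (Or.inr rfl)]
  by_cases h : length ≤ 0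
  · rw [PySem.List.pyRange_one_eq_nil (by omega), if_pos h]
    simp [altseq]
  · rw [if_neg h]
    have hlen : (PySem.List.pyRange 0 length 1).length = length.toNat := by
      rw [PySem.List.length_pyRange_one]; omega
    have hfd : PySem.Int.floordiv length 2 = (length.toNat / 2 : Nat) := by
      rw [PySem.Int.floordiv_eq_ediv_of_pos (by norm_num)]
      omega
    have hmd : PySem.Int.mod length 2 = (length.toNat % 2 : Nat) := by
      rw [PySem.Int.mod_eq_emod_of_pos (by norm_num)]
      omega
    rw [hlen, hfd, hmd]
    simp only [Int.toNat_natCast, pyRepeatList]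
    rcases Nat.even_or_odd length.toNat with ⟨k, hk⟩ | ⟨k, hk⟩
    · rw [hk, show k + k = 2 * k by omega, altseq_even]
      simp [Nat.mul_mod_right, show 2 * k / 2 = k by omega]
    · rw [hk, altseq_odd]
      simp [show (2 * k + 1) / 2 = k by omega, show (2 * k + 1) % 2 = 1 by omega]
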